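-- pv_equiv track=rewrite | github.com/paulpol25/uac-ai-parser-web | backend/app/services/tiered_rag_service.py | _classify_artifact_category
-- ===== SOURCE A (Python) =====
-- def _classify_artifact_category(file_path: str, content: str) -> str:
--     """
--     Classify artifact into forensic category.
--     More nuanced than source_type - uses content analysis.
--     """
--     path_lower = file_path.lower()
--     content_lower = content[:1000].lower()  # Sample first 1000 chars
--
--     # User-related
--     if any(x in path_lower for x in ['passwd', 'shadow', 'group', 'home/', 'users/']):
--         return 'users'
--     if any(x in content_lower for x in ['uid=', 'gid=', 'username', 'user:']):
--         return 'users'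
--
--     # Authentication
--     if any(x in path_lower for x in ['auth', 'login', 'ssh', 'pam']):
--         return 'authentication'
--
--     # Network
--     if any(x in path_lower for x in ['network', 'hosts', 'resolv', 'interface', 'iptables']):
--         return 'network'
--     if any(x in content_lower for x in ['ip_address', 'port', 'listen', 'connect']):
--         return 'network'
--
--     # Persistence
--     if any(x in path_lower for x in ['cron', 'systemd', 'init.d', 'rc.local', 'startup']):
--         return 'persistence'
--
--     # Logs
--     if any(x in path_lower for x in ['.log', 'syslog', 'journal', 'audit']):
--         return 'logs'
--
--     # Processes
--     if any(x in path_lower for x in ['proc/', 'ps', 'process']):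
--         return 'processes'
--
--     # Configuration
--     if any(x in path_lower for x in ['.conf', '.cfg', 'config', 'settings']):
--         return 'configuration'
--
--     return 'other'
-- ===== SOURCE B (Python) =====
-- # B: text-driven multi-pattern scan. Instead of testing each keyword against the text,
-- # slide over each text once and look up every window in a keyword -> rule-index hash map,
-- # keeping the smallest matching rule index; the category of that index is the answer.
-- # Correct because A's if-chain returns the category of the minimal-index matching rule.
--
-- _CATS = ['users', 'users', 'authentication', 'network', 'network',
--          'persistence', 'logs', 'processes', 'configuration']
--
-- _PATH_KW = {
--     'passwd': 0, 'shadow': 0, 'group': 0, 'home/': 0, 'users/': 0,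
--     'auth': 2, 'login': 2, 'ssh': 2, 'pam': 2,
--     'network': 3, 'hosts': 3, 'resolv': 3, 'interface': 3, 'iptables': 3,
--     'cron': 5, 'systemd': 5, 'init.d': 5, 'rc.local': 5, 'startup': 5,
--     '.log': 6, 'syslog': 6, 'journal': 6, 'audit': 6,
--     'proc/': 7, 'ps': 7, 'process': 7,
--     '.conf': 8, '.cfg': 8, 'config': 8, 'settings': 8,
-- }
-- _CONTENT_KW = {
--     'uid=': 1, 'gid=': 1, 'username': 1, 'user:': 1,
--     'ip_address': 4, 'port': 4, 'listen': 4, 'connect': 4,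
-- }
-- _PATH_LENS = sorted({len(k) for k in _PATH_KW})
-- _CONTENT_LENS = sorted({len(k) for k in _CONTENT_KW})
--
--
-- def _scan(text, table, lens, best):
--     for i in range(len(text)):
--         for L in lens:
--             j = table.get(text[i:i + L])
--             if j is not None and j < best:
--                 best = j
--     return best
--
--
-- def _classify_artifact_category(file_path: str, content: str) -> str:
--     best = _scan(file_path.lower(), _PATH_KW, _PATH_LENS, len(_CATS))
--     best = _scan(content[:1000].lower(), _CONTENT_KW, _CONTENT_LENS, best)
--     return _CATS[best] if best < len(_CATS) else 'other'
-- ===== Notes on version B (the rewrite author's own statement) =====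
-- stated objective: alternative
-- what changed: Replaced A's keyword-by-keyword if-chain of substring tests by a text-driven scan: every window of the two lowered texts is looked up in a keyword-to-rule-index hash table and the minimal matching rule index selects the category.
import Mathlib
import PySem

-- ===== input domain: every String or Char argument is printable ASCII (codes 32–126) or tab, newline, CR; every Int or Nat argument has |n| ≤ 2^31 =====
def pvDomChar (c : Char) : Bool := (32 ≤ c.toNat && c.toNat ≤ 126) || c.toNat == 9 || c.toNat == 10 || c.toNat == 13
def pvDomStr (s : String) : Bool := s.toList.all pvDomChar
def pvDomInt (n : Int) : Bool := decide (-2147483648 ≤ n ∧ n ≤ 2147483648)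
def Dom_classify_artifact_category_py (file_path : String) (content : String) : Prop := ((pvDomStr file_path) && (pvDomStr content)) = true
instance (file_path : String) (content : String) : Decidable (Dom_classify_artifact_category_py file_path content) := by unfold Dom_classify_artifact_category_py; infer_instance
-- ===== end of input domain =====

-- B replaces A's keyword-by-keyword if-chain by a single text-driven scan: every window of each
-- lowered text is looked up in a keyword -> rule-index hash table and the minimal matching rule
-- index selects the category (objective: alternative algorithm, same result).

-- ===== PORT A =====
def classify_artifact_category_py (file_path : String) (content : String) : String :=
  let path_lower := PySem.Str.lower file_path
  let content_lower := PySem.Str.lower (PySem.Str.slice content none (some 1000))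
  if ["passwd", "shadow", "group", "home/", "users/"].any (fun x => PySem.Str.isIn x path_lower) then "users"
  else if ["uid=", "gid=", "username", "user:"].any (fun x => PySem.Str.isIn x content_lower) then "users"
  else if ["auth", "login", "ssh", "pam"].any (fun x => PySem.Str.isIn x path_lower) then "authentication"
  else if ["network", "hosts", "resolv", "interface", "iptables"].any (fun x => PySem.Str.isIn x path_lower) then "network"
  else if ["ip_address", "port", "listen", "connect"].any (fun x => PySem.Str.isIn x content_lower) then "network"
  else if ["cron", "systemd", "init.d", "rc.local", "startup"].any (fun x => PySem.Str.isIn x path_lower) then "persistence"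
  else if [".log", "syslog", "journal", "audit"].any (fun x => PySem.Str.isIn x path_lower) then "logs"
  else if ["proc/", "ps", "process"].any (fun x => PySem.Str.isIn x path_lower) then "processes"
  else if [".conf", ".cfg", "config", "settings"].any (fun x => PySem.Str.isIn x path_lower) then "configuration"
  else "other"

-- ===== PORT B =====
-- Source B's _CATS
def pvCats : List String :=
  ["users", "users", "authentication", "network", "network",
   "persistence", "logs", "processes", "configuration"]

-- Source B's _PATH_KW / _CONTENT_KW: keyword -> rule index (dict literals, distinct keys)
def pvPathKW : PySem.Dict (List Char) Nat := PySem.Dict.mk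
  [("passwd".toList, 0), ("shadow".toList, 0), ("group".toList, 0), ("home/".toList, 0), ("users/".toList, 0),
   ("auth".toList, 2), ("login".toList, 2), ("ssh".toList, 2), ("pam".toList, 2),
   ("network".toList, 3), ("hosts".toList, 3), ("resolv".toList, 3), ("interface".toList, 3), ("iptables".toList, 3),
   ("cron".toList, 5), ("systemd".toList, 5), ("init.d".toList, 5), ("rc.local".toList, 5), ("startup".toList, 5),
   (".log".toList, 6), ("syslog".toList, 6), ("journal".toList, 6), ("audit".toList, 6),
   ("proc/".toList, 7), ("ps".toList, 7), ("process".toList, 7),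
   (".conf".toList, 8), (".cfg".toList, 8), ("config".toList, 8), ("settings".toList, 8)]

def pvContentKW : PySem.Dict (List Char) Nat := PySem.Dict.mk
  [("uid=".toList, 1), ("gid=".toList, 1), ("username".toList, 1), ("user:".toList, 1),
   ("ip_address".toList, 4), ("port".toList, 4), ("listen".toList, 4), ("connect".toList, 4)]

-- Source B's _PATH_LENS / _CONTENT_LENS (sorted distinct key lengths)
def pvPathLens : List Nat := [2, 3, 4, 5, 6, 7, 8, 9]
def pvContentLens : List Nat := [4, 5, 6, 7, 8, 10]

-- Source B's _scan: for i in range(len(text)): for L in lens: look the window text[i:i+L] up,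
-- keep the smallest index.  text[i:i+L] with 0 ≤ i is exactly (t.drop i).take L.
def pvScanKW (tbl : PySem.Dict (List Char) Nat) (lens : List Nat) (t : List Char) (best : Nat) : Nat :=
  (List.range t.length).foldl (fun b i =>
    lens.foldl (fun b L =>
      match tbl.get? ((t.drop i).take L) with
      | some j => if j < b then j else b
      | none => b) b) best

def classify_artifact_category_py_alt (file_path : String) (content : String) : String :=
  let best1 := pvScanKW pvPathKW pvPathLens (PySem.Chars.lower file_path.toList) pvCats.length
  let best := pvScanKW pvContentKW pvContentLens
      (PySem.Chars.lower (PySem.Chars.slice content.toList none (some 1000))) best1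
  if best < pvCats.length then pvCats.getD best "other" else "other"

-- ===== PRECONDITION & SPEC =====
def Spec_classify_artifact_category_py (file_path : String) (content : String) (out : String) : Prop := out = classify_artifact_category_py_alt file_path content
instance (file_path : String) (content : String) (out : String) : Decidable (Spec_classify_artifact_category_py file_path content out) := by unfold Spec_classify_artifact_category_py; infer_instance

-- ===== CLAIM (what is proved, stated in full; the proofs are below) =====
def Claim_equal_classify_artifact_category_py : Prop := ∀ (file_path : String) (content : String), Dom_classify_artifact_category_py file_path content → Spec_classify_artifact_category_py file_path content (classify_artifact_category_py file_path content)

-- ===== LEMMAS AND PROOFS =====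

-- a hit of table `tbl` in text `t` with value j: some key with value j occurs in t
def pvHit (tbl : PySem.Dict (List Char) Nat) (t : List Char) (j : Nat) : Prop :=
  ∃ k, (k, j) ∈ tbl.items ∧ k <:+: t

-- generic facts about the inner-loop fold shape
theorem pvInnerFold_le {α : Type} (g : α → Option Nat) (xs : List α) (b : Nat) :
    xs.foldl (fun b x => match g x with
      | some j => if j < b then j else b
      | none => b) b ≤ b := by
  induction xs generalizing b with
  | nil => simp
  | cons x xs ih =>
    simp only [List.foldl_cons]
    refine le_trans (ih _) ?_
    cases hg : g x with
    | none => simp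
    | some j => dsimp; split <;> omega

theorem pvInnerFold_cases {α : Type} (g : α → Option Nat) (xs : List α) (b : Nat) :
    xs.foldl (fun b x => match g x with
      | some j => if j < b then j else b
      | none => b) b = b ∨
    ∃ x ∈ xs, g x = some (xs.foldl (fun b x => match g x with
      | some j => if j < b then j else b
      | none => b) b) := by
  induction xs generalizing b with
  | nil => simp
  | cons x xs ih =>
    simp only [List.foldl_cons]
    rcases ih (match g x with
      | some j => if j < b then j else b
      | none => b) with h | ⟨y, hy, hg⟩
    · rw [h]
      cases hg : g x with
      | none => simp
      | some j =>
        dsimp; split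
        · exact Or.inr ⟨x, by simp, by rw [hg]⟩
        · simp
    · exact Or.inr ⟨y, by simp [hy], hg⟩

theorem pvInnerFold_le_hit {α : Type} (g : α → Option Nat) (xs : List α) (b : Nat)
    (x : α) (hx : x ∈ xs) (j : Nat) (hg : g x = some j) :
    xs.foldl (fun b x => match g x with
      | some j => if j < b then j else b
      | none => b) b ≤ j := by
  induction xs generalizing b with
  | nil => simp at hx
  | cons y ys ih =>
    simp only [List.foldl_cons]
    rcases List.mem_cons.mp hx with rfl | hmem
    · refine le_trans (pvInnerFold_le g ys _) ?_
      rw [hg]; dsimp; split <;> omega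
    · exact ih _ hmem

-- the outer fold never increases the accumulator (any index list)
theorem pvOuterFold_le (tbl : PySem.Dict (List Char) Nat) (lens : List Nat) (t : List Char)
    (is : List Nat) (b : Nat) :
    is.foldl (fun b i =>
      lens.foldl (fun b L =>
        match tbl.get? ((t.drop i).take L) with
        | some j => if j < b then j else b
        | none => b) b) b ≤ b := by
  induction is generalizing b with
  | nil => simp
  | cons i is ih =>
    exact le_trans (ih _) (pvInnerFold_le (fun L => tbl.get? ((t.drop i).take L)) lens b)

-- the scan never increases the accumulator
theorem pvScanKW_le (tbl : PySem.Dict (List Char) Nat) (lens : List Nat) (t : List Char) (b : Nat) :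
    pvScanKW tbl lens t b ≤ b := pvOuterFold_le tbl lens t _ b

-- the scan result is the initial value or a hit value
theorem pvScanKW_cases (tbl : PySem.Dict (List Char) Nat) (lens : List Nat) (t : List Char) (b : Nat) :
    pvScanKW tbl lens t b = b ∨ pvHit tbl t (pvScanKW tbl lens t b) := by
  unfold pvScanKW
  induction (List.range t.length) generalizing b with
  | nil => simp
  | cons i is ih =>
    simp only [List.foldl_cons]
    rcases ih (lens.foldl (fun b L =>
      match tbl.get? ((t.drop i).take L) with
      | some j => if j < b then j else b
      | none => b) b) with h | hhit
    · rw [h]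
      rcases pvInnerFold_cases (fun L => tbl.get? ((t.drop i).take L)) lens b with h2 | ⟨L, _, hg⟩
      · rw [h2]; exact Or.inl rfl
      · refine Or.inr ⟨(t.drop i).take L, PySem.Dict.mem_items_of_get?_eq_some tbl hg, ?_⟩
        exact ((t.drop i).take_prefix L).isInfix.trans (t.drop_suffix i).isInfix
    · exact Or.inr hhit

-- the scan result is ≤ every hit whose key length is in lens (and key nonempty)
theorem pvScanKW_le_hit (tbl : PySem.Dict (List Char) Nat) (lens : List Nat) (t : List Char) (b : Nat)
    (hnd : tbl.keys.Nodup)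
    (hlens : ∀ p ∈ tbl.items, p.1.length ∈ lens ∧ p.1 ≠ [])
    (j : Nat) (hhit : pvHit tbl t j) :
    pvScanKW tbl lens t b ≤ j := by
  obtain ⟨k, hmem, hinf⟩ := hhit
  obtain ⟨hL, hne⟩ := hlens _ hmem
  -- the key occurs as a prefix of some t.drop i with i < t.length
  have hisin : PySem.Chars.isIn k t = true := (PySem.Chars.isIn_iff_infix k t).mpr hinf
  obtain ⟨i, hpre⟩ := (PySem.Chars.exists_prefix_drop_iff_isIn k t).mpr hisin
  have hi : i < t.length := by
    by_contra h
    have : t.drop i = [] := List.drop_eq_nil_of_le (by omega)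
    rw [this] at hpre
    exact hne (List.prefix_nil.mp hpre)
  have htake : (t.drop i).take k.length = k := (List.prefix_iff_eq_take.mp hpre).symm
  have hget : tbl.get? ((t.drop i).take k.length) = some j := by
    rw [htake]
    exact (PySem.Dict.get?_eq_some_iff_mem_items tbl k j hnd).mpr hmem
  -- split the outer fold at position i
  unfold pvScanKW
  have hmem_i : i ∈ List.range t.length := List.mem_range.mpr hi
  obtain ⟨l1, l2, hsplit⟩ := List.append_of_mem hmem_i
  rw [hsplit, List.foldl_append, List.foldl_cons]
  exact le_trans (pvOuterFold_le tbl lens t l2 _)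
    (pvInnerFold_le_hit (fun L => tbl.get? ((t.drop i).take L)) lens _ k.length hL j hget)

-- table well-formedness (used by pvScanKW_le_hit)
theorem pvPathKW_nodup : pvPathKW.keys.Nodup := by decide
theorem pvContentKW_nodup : pvContentKW.keys.Nodup := by decide
theorem pvPathKW_lens : ∀ p ∈ pvPathKW.items, p.1.length ∈ pvPathLens ∧ p.1 ≠ [] := by decide
theorem pvContentKW_lens : ∀ p ∈ pvContentKW.items, p.1.length ∈ pvContentLens ∧ p.1 ≠ [] := by decide

-- table values are rule indices < 9
theorem pvPathKW_vals : ∀ p ∈ pvPathKW.items, p.2 < 9 := by decide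
theorem pvContentKW_vals : ∀ p ∈ pvContentKW.items, p.2 < 9 := by decide

-- per-rule correspondence between table hits and A's keyword conditions
theorem pvIff0 (pl cl : List Char) :
    pvHit pvPathKW pl 0 ∨ pvHit pvContentKW cl 0 ↔
    (["passwd", "shadow", "group", "home/", "users/"].any (fun x => PySem.Chars.isIn x.toList pl)) = true := by
  simp [pvHit, pvPathKW, pvContentKW, PySem.Chars.isIn_iff_infix]
theorem pvIff1 (pl cl : List Char) :
    pvHit pvPathKW pl 1 ∨ pvHit pvContentKW cl 1 ↔
    (["uid=", "gid=", "username", "user:"].any (fun x => PySem.Chars.isIn x.toList cl)) = true := by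
  simp [pvHit, pvPathKW, pvContentKW, PySem.Chars.isIn_iff_infix]
theorem pvIff2 (pl cl : List Char) :
    pvHit pvPathKW pl 2 ∨ pvHit pvContentKW cl 2 ↔
    (["auth", "login", "ssh", "pam"].any (fun x => PySem.Chars.isIn x.toList pl)) = true := by
  simp [pvHit, pvPathKW, pvContentKW, PySem.Chars.isIn_iff_infix]
theorem pvIff3 (pl cl : List Char) :
    pvHit pvPathKW pl 3 ∨ pvHit pvContentKW cl 3 ↔
    (["network", "hosts", "resolv", "interface", "iptables"].any (fun x => PySem.Chars.isIn x.toList pl)) = true := by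
  simp [pvHit, pvPathKW, pvContentKW, PySem.Chars.isIn_iff_infix]
theorem pvIff4 (pl cl : List Char) :
    pvHit pvPathKW pl 4 ∨ pvHit pvContentKW cl 4 ↔
    (["ip_address", "port", "listen", "connect"].any (fun x => PySem.Chars.isIn x.toList cl)) = true := by
  simp [pvHit, pvPathKW, pvContentKW, PySem.Chars.isIn_iff_infix]
theorem pvIff5 (pl cl : List Char) :
    pvHit pvPathKW pl 5 ∨ pvHit pvContentKW cl 5 ↔
    (["cron", "systemd", "init.d", "rc.local", "startup"].any (fun x => PySem.Chars.isIn x.toList pl)) = true := by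
  simp [pvHit, pvPathKW, pvContentKW, PySem.Chars.isIn_iff_infix]
theorem pvIff6 (pl cl : List Char) :
    pvHit pvPathKW pl 6 ∨ pvHit pvContentKW cl 6 ↔
    ([".log", "syslog", "journal", "audit"].any (fun x => PySem.Chars.isIn x.toList pl)) = true := by
  simp [pvHit, pvPathKW, pvContentKW, PySem.Chars.isIn_iff_infix]
theorem pvIff7 (pl cl : List Char) :
    pvHit pvPathKW pl 7 ∨ pvHit pvContentKW cl 7 ↔
    (["proc/", "ps", "process"].any (fun x => PySem.Chars.isIn x.toList pl)) = true := by
  simp [pvHit, pvPathKW, pvContentKW, PySem.Chars.isIn_iff_infix]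
theorem pvIff8 (pl cl : List Char) :
    pvHit pvPathKW pl 8 ∨ pvHit pvContentKW cl 8 ↔
    ([".conf", ".cfg", "config", "settings"].any (fun x => PySem.Chars.isIn x.toList pl)) = true := by
  simp [pvHit, pvPathKW, pvContentKW, PySem.Chars.isIn_iff_infix]

-- ===== VERDICT (by name: the statement is the Claim_ definition above) =====
theorem classify_artifact_category_py_spec : Claim_equal_classify_artifact_category_py := by
  intro file_path content _
  unfold Spec_classify_artifact_category_py classify_artifact_category_py classify_artifact_category_py_alt
  simp only [PySem.Str.isIn_eq, PySem.Str.toList_lower, PySem.Str.toList_slice]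
  generalize PySem.Chars.lower file_path.toList = pl
  generalize PySem.Chars.lower (PySem.Chars.slice content.toList none (some 1000)) = cl
  have hlePH : ∀ j, pvHit pvPathKW pl j →
      pvScanKW pvContentKW pvContentLens cl (pvScanKW pvPathKW pvPathLens pl pvCats.length) ≤ j :=
    fun j hj => le_trans (pvScanKW_le _ _ _ _)
      (pvScanKW_le_hit pvPathKW pvPathLens pl pvCats.length pvPathKW_nodup pvPathKW_lens j hj)
  have hleCH : ∀ j, pvHit pvContentKW cl j →
      pvScanKW pvContentKW pvContentLens cl (pvScanKW pvPathKW pvPathLens pl pvCats.length) ≤ j :=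
    fun j hj => pvScanKW_le_hit pvContentKW pvContentLens cl _ pvContentKW_nodup pvContentKW_lens j hj
  have hcasesB : (pvScanKW pvContentKW pvContentLens cl (pvScanKW pvPathKW pvPathLens pl pvCats.length) = 9)
      ∨ pvHit pvPathKW pl (pvScanKW pvContentKW pvContentLens cl (pvScanKW pvPathKW pvPathLens pl pvCats.length))
      ∨ pvHit pvContentKW cl (pvScanKW pvContentKW pvContentLens cl (pvScanKW pvPathKW pvPathLens pl pvCats.length)) := by
    rcases pvScanKW_cases pvContentKW pvContentLens cl (pvScanKW pvPathKW pvPathLens pl pvCats.length) with h | h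
    · rw [h]
      rcases pvScanKW_cases pvPathKW pvPathLens pl pvCats.length with h2 | h2
      · rw [h2]; exact Or.inl rfl
      · exact Or.inr (Or.inl h2)
    · exact Or.inr (Or.inr h)
  set best := pvScanKW pvContentKW pvContentLens cl (pvScanKW pvPathKW pvPathLens pl pvCats.length) with hbest
  clear_value best
  by_cases c0 : (["passwd", "shadow", "group", "home/", "users/"].any fun x => PySem.Chars.isIn x.toList pl) = true
  · rw [if_pos c0]
    have hler : best ≤ 0 := by rcases (pvIff0 pl cl).mpr c0 with h | h; exacts [hlePH 0 h, hleCH 0 h]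
    have hb : best = 0 := by omega
    rw [hb]; decide
  · rw [if_neg c0]
    by_cases c1 : (["uid=", "gid=", "username", "user:"].any fun x => PySem.Chars.isIn x.toList cl) = true
    · rw [if_pos c1]
      have hler : best ≤ 1 := by rcases (pvIff1 pl cl).mpr c1 with h | h; exacts [hlePH 1 h, hleCH 1 h]
      have hhit : pvHit pvPathKW pl best ∨ pvHit pvContentKW cl best := by
        rcases hcasesB with h9 | h
        · omega
        · exact h
      have hb : best = 1 := by
        interval_cases best
        · exact absurd ((pvIff0 pl cl).mp hhit) c0
        · rfl
      rw [hb]; decide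
    · rw [if_neg c1]
      by_cases c2 : (["auth", "login", "ssh", "pam"].any fun x => PySem.Chars.isIn x.toList pl) = true
      · rw [if_pos c2]
        have hler : best ≤ 2 := by rcases (pvIff2 pl cl).mpr c2 with h | h; exacts [hlePH 2 h, hleCH 2 h]
        have hhit : pvHit pvPathKW pl best ∨ pvHit pvContentKW cl best := by
          rcases hcasesB with h9 | h
          · omega
          · exact h
        have hb : best = 2 := by
          interval_cases best
          · exact absurd ((pvIff0 pl cl).mp hhit) c0
          · exact absurd ((pvIff1 pl cl).mp hhit) c1
          · rfl
        rw [hb]; decide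
      · rw [if_neg c2]
        by_cases c3 : (["network", "hosts", "resolv", "interface", "iptables"].any fun x => PySem.Chars.isIn x.toList pl) = true
        · rw [if_pos c3]
          have hler : best ≤ 3 := by rcases (pvIff3 pl cl).mpr c3 with h | h; exacts [hlePH 3 h, hleCH 3 h]
          have hhit : pvHit pvPathKW pl best ∨ pvHit pvContentKW cl best := by
            rcases hcasesB with h9 | h
            · omega
            · exact h
          have hb : best = 3 := by
            interval_cases best
            · exact absurd ((pvIff0 pl cl).mp hhit) c0
            · exact absurd ((pvIff1 pl cl).mp hhit) c1
            · exact absurd ((pvIff2 pl cl).mp hhit) c2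
            · rfl
          rw [hb]; decide
        · rw [if_neg c3]
          by_cases c4 : (["ip_address", "port", "listen", "connect"].any fun x => PySem.Chars.isIn x.toList cl) = true
          · rw [if_pos c4]
            have hler : best ≤ 4 := by rcases (pvIff4 pl cl).mpr c4 with h | h; exacts [hlePH 4 h, hleCH 4 h]
            have hhit : pvHit pvPathKW pl best ∨ pvHit pvContentKW cl best := by
              rcases hcasesB with h9 | h
              · omega
              · exact h
            have hb : best = 4 := by
              interval_cases best
              · exact absurd ((pvIff0 pl cl).mp hhit) c0
              · exact absurd ((pvIff1 pl cl).mp hhit) c1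
              · exact absurd ((pvIff2 pl cl).mp hhit) c2
              · exact absurd ((pvIff3 pl cl).mp hhit) c3
              · rfl
            rw [hb]; decide
          · rw [if_neg c4]
            by_cases c5 : (["cron", "systemd", "init.d", "rc.local", "startup"].any fun x => PySem.Chars.isIn x.toList pl) = true
            · rw [if_pos c5]
              have hler : best ≤ 5 := by rcases (pvIff5 pl cl).mpr c5 with h | h; exacts [hlePH 5 h, hleCH 5 h]
              have hhit : pvHit pvPathKW pl best ∨ pvHit pvContentKW cl best := by
                rcases hcasesB with h9 | h
                · omega
                · exact h
              have hb : best = 5 := by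
                interval_cases best
                · exact absurd ((pvIff0 pl cl).mp hhit) c0
                · exact absurd ((pvIff1 pl cl).mp hhit) c1
                · exact absurd ((pvIff2 pl cl).mp hhit) c2
                · exact absurd ((pvIff3 pl cl).mp hhit) c3
                · exact absurd ((pvIff4 pl cl).mp hhit) c4
                · rfl
              rw [hb]; decide
            · rw [if_neg c5]
              by_cases c6 : ([".log", "syslog", "journal", "audit"].any fun x => PySem.Chars.isIn x.toList pl) = true
              · rw [if_pos c6]
                have hler : best ≤ 6 := by rcases (pvIff6 pl cl).mpr c6 with h | h; exacts [hlePH 6 h, hleCH 6 h]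
                have hhit : pvHit pvPathKW pl best ∨ pvHit pvContentKW cl best := by
                  rcases hcasesB with h9 | h
                  · omega
                  · exact h
                have hb : best = 6 := by
                  interval_cases best
                  · exact absurd ((pvIff0 pl cl).mp hhit) c0
                  · exact absurd ((pvIff1 pl cl).mp hhit) c1
                  · exact absurd ((pvIff2 pl cl).mp hhit) c2
                  · exact absurd ((pvIff3 pl cl).mp hhit) c3
                  · exact absurd ((pvIff4 pl cl).mp hhit) c4
                  · exact absurd ((pvIff5 pl cl).mp hhit) c5
                  · rfl
                rw [hb]; decide
              · rw [if_neg c6]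
                by_cases c7 : (["proc/", "ps", "process"].any fun x => PySem.Chars.isIn x.toList pl) = true
                · rw [if_pos c7]
                  have hler : best ≤ 7 := by rcases (pvIff7 pl cl).mpr c7 with h | h; exacts [hlePH 7 h, hleCH 7 h]
                  have hhit : pvHit pvPathKW pl best ∨ pvHit pvContentKW cl best := by
                    rcases hcasesB with h9 | h
                    · omega
                    · exact h
                  have hb : best = 7 := by
                    interval_cases best
                    · exact absurd ((pvIff0 pl cl).mp hhit) c0
                    · exact absurd ((pvIff1 pl cl).mp hhit) c1
                    · exact absurd ((pvIff2 pl cl).mp hhit) c2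
                    · exact absurd ((pvIff3 pl cl).mp hhit) c3
                    · exact absurd ((pvIff4 pl cl).mp hhit) c4
                    · exact absurd ((pvIff5 pl cl).mp hhit) c5
                    · exact absurd ((pvIff6 pl cl).mp hhit) c6
                    · rfl
                  rw [hb]; decide
                · rw [if_neg c7]
                  by_cases c8 : ([".conf", ".cfg", "config", "settings"].any fun x => PySem.Chars.isIn x.toList pl) = true
                  · rw [if_pos c8]
                    have hler : best ≤ 8 := by rcases (pvIff8 pl cl).mpr c8 with h | h; exacts [hlePH 8 h, hleCH 8 h]
                    have hhit : pvHit pvPathKW pl best ∨ pvHit pvContentKW cl best := by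
                      rcases hcasesB with h9 | h
                      · omega
                      · exact h
                    have hb : best = 8 := by
                      interval_cases best
                      · exact absurd ((pvIff0 pl cl).mp hhit) c0
                      · exact absurd ((pvIff1 pl cl).mp hhit) c1
                      · exact absurd ((pvIff2 pl cl).mp hhit) c2
                      · exact absurd ((pvIff3 pl cl).mp hhit) c3
                      · exact absurd ((pvIff4 pl cl).mp hhit) c4
                      · exact absurd ((pvIff5 pl cl).mp hhit) c5
                      · exact absurd ((pvIff6 pl cl).mp hhit) c6
                      · exact absurd ((pvIff7 pl cl).mp hhit) c7
                      · rfl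
                    rw [hb]; decide
                  · rw [if_neg c8]
                    rcases hcasesB with h9 | hhit
                    · rw [h9]; decide
                    · have hb9 : best < 9 := by
                        rcases hhit with ⟨k, hm, _⟩ | ⟨k, hm, _⟩
                        · exact pvPathKW_vals _ hm
                        · exact pvContentKW_vals _ hm
                      exfalso
                      interval_cases best
                      · exact absurd ((pvIff0 pl cl).mp hhit) c0
                      · exact absurd ((pvIff1 pl cl).mp hhit) c1
                      · exact absurd ((pvIff2 pl cl).mp hhit) c2
                      · exact absurd ((pvIff3 pl cl).mp hhit) c3
                      · exact absurd ((pvIff4 pl cl).mp hhit) c4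
                      · exact absurd ((pvIff5 pl cl).mp hhit) c5
                      · exact absurd ((pvIff6 pl cl).mp hhit) c6
                      · exact absurd ((pvIff7 pl cl).mp hhit) c7
                      · exact absurd ((pvIff8 pl cl).mp hhit) c8
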